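-- pv_equiv track=rewrite | github.com/adamjelkins/achievecx-consultant | backend/vendor_catalog.py | _score_industry_fit
-- ===== SOURCE A (Python) =====
-- def _score_industry_fit(vendor: dict, industry: str) -> int:
--     """20 pts — is vendor strong in client's industry?"""
--     vendor_industries = [i.lower() for i in vendor.get("best_for_industries", [])]
--     client_industry   = (industry or "").lower()
--
--     if not client_industry or client_industry == "unknown":
--         return 10  # neutral
--
--     # Exact match
--     if client_industry in vendor_industries:
--         return 20
--
--     # Partial match (e.g. "financial" matches "financial services")
--     for vi in vendor_industries:
--         if client_industry in vi or vi in client_industry: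
--             return 15
--
--     return 5
-- ===== SOURCE B (Python) =====
-- def _score_industry_fit(vendor: dict, industry: str) -> int:
--     """20 pts - is vendor strong in client's industry?
--
--     One pass: score each vendor industry independently (20 exact, 15 partial,
--     5 otherwise) and take the max, default 5 for an empty list.  The max
--     preserves the priority exact > partial > default regardless of order.
--     """
--     client = (industry or "").lower()
--     if not client or client == "unknown":
--         return 10
--     return max(
--         (20 if vi == client else 15 if (client in vi or vi in client) else 5
--          for vi in (i.lower() for i in vendor.get("best_for_industries", []))),
--         default=5,
--     )
-- ===== Notes on version B (the rewrite author's own statement) =====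
-- stated objective: simpler
-- what changed: Replaces A's two-stage control flow (exact-membership test, then a separate partial-match scan with early returns) by a single pass that maps each vendor industry to a per-item score (20/15/5) and returns the max with default 5.
import Mathlib
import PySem

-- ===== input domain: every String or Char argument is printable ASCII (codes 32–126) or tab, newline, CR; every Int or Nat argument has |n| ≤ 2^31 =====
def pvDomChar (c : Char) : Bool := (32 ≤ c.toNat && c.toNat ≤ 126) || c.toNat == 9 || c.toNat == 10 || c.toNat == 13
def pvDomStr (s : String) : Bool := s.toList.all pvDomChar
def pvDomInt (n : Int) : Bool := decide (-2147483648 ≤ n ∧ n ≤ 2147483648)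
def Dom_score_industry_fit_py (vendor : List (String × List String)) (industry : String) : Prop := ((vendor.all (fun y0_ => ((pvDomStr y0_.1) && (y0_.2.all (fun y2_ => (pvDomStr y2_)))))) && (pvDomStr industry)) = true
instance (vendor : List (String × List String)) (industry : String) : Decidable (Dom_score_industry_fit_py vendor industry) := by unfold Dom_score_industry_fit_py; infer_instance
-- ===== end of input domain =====

-- B collapses A's exact-membership pass and partial-match scan into one pass taking the max of per-item scores (simpler decomposition; same cost).


-- ===== PORT A =====
-- the 'for vi in vendor_industries: if … return 15' loop; 5 = the final return
def pvPartialLoop (c : String) (vis : List String) : Int :=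
  match vis with
  | [] => 5
  | vi :: t => if PySem.Str.isIn c vi || PySem.Str.isIn vi c then 15 else pvPartialLoop c t

def score_industry_fit_py (vendor : List (String × List String)) (industry : String) : Int :=
  let vendor_industries := (PySem.Dict.getD ⟨vendor⟩ "best_for_industries" []).map PySem.Str.lower
  let client_industry := PySem.Str.lower industry  -- (industry or "").lower(): "".lower() = ""
  if client_industry = "" ∨ client_industry = "unknown" then 10
  else if vendor_industries.contains client_industry then 20
  else pvPartialLoop client_industry vendor_industries

-- ===== PORT B =====
-- per-item score: 20 exact, 15 partial, 5 otherwise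
def pvItemScore (c : String) (vi : String) : Int :=
  if vi = c then 20 else if PySem.Str.isIn c vi || PySem.Str.isIn vi c then 15 else 5

def score_industry_fit_py_alt (vendor : List (String × List String)) (industry : String) : Int :=
  let client := PySem.Str.lower industry
  if client = "" ∨ client = "unknown" then 10
  else PySem.List.maxD
        ((PySem.Dict.getD ⟨vendor⟩ "best_for_industries" []).map
          (fun i => pvItemScore client (PySem.Str.lower i)))
        (fun x => x) 5

-- ===== PRECONDITION & SPEC =====
def Spec_score_industry_fit_py (vendor : List (String × List String)) (industry : String) (out : Int) : Prop := out = score_industry_fit_py_alt vendor industry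
instance (vendor : List (String × List String)) (industry : String) (out : Int) : Decidable (Spec_score_industry_fit_py vendor industry out) := by unfold Spec_score_industry_fit_py; infer_instance

-- ===== CLAIM (what is proved, stated in full; the proofs are below) =====
def Claim_equal_score_industry_fit_py : Prop := ∀ (vendor : List (String × List String)) (industry : String), Dom_score_industry_fit_py vendor industry → Spec_score_industry_fit_py vendor industry (score_industry_fit_py vendor industry)

-- ===== LEMMAS AND PROOFS =====

-- A's value after the neutral guard, as a function of the lowered lists
def pvACore (c : String) (vis : List String) : Int :=
  if vis.contains c then 20 else pvPartialLoop c vis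

theorem pvPartialLoop_bounds (c : String) (vis : List String) :
    5 ≤ pvPartialLoop c vis ∧ pvPartialLoop c vis ≤ 15 := by
  induction vis with
  | nil => simp [pvPartialLoop]
  | cons v t ih => simp only [pvPartialLoop]; split <;> omega

theorem pvACore_bounds (c : String) (vis : List String) :
    5 ≤ pvACore c vis ∧ pvACore c vis ≤ 20 := by
  have := pvPartialLoop_bounds c vis
  unfold pvACore; split <;> omega

theorem pvItemScore_ge (c vi : String) : 5 ≤ pvItemScore c vi := by
  unfold pvItemScore; split_ifs <;> omega

theorem pvACore_cons (c v : String) (t : List String) :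
    pvACore c (v :: t) = max (pvItemScore c v) (pvACore c t) := by
  have hp := pvPartialLoop_bounds c t
  have hPL : pvPartialLoop c (v :: t)
      = if PySem.Str.isIn c v || PySem.Str.isIn v c then (15 : Int) else pvPartialLoop c t := rfl
  by_cases hv : v = c
  · subst hv
    have h1 : pvACore v (v :: t) = 20 := by simp [pvACore]
    have h2 : pvItemScore v v = 20 := by simp [pvItemScore]
    have hb := pvACore_bounds v t
    rw [h1, h2, max_def]
    split <;> omega
  · simp only [pvACore, pvItemScore, List.contains_cons, hPL, if_neg hv]
    have hcv : ¬(c = v) := fun h => hv h.symm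
    simp [max_def, hcv]
    split_ifs <;> omega

-- PySem.List.max? over Int with identity key is a foldl of max
theorem pvMaxFoldSome : ∀ (l : List Int) (acc : Int),
    PySem.List.max? (acc :: l) (fun x => x) = some (l.foldl max acc) := by
  intro l
  induction l with
  | nil => intro acc; simp [PySem.List.max?]
  | cons x t ih =>
    intro acc
    have hx := ih x
    have ha := ih acc
    simp only [PySem.List.max?, List.foldl_cons] at hx ha ⊢
    by_cases h : acc < x
    · simp only [h, if_true]
      rw [hx, show max acc x = x by omega]
    · simp only [h, if_false]
      rw [ha, show max acc x = acc by omega]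

-- foldl of Int max with accumulator ≥ 5 computes max acc (pvACore c vis)
theorem pvFoldMax (c : String) (vis : List String) :
    ∀ acc : Int, 5 ≤ acc →
      (vis.map (pvItemScore c)).foldl max acc = max acc (pvACore c vis) := by
  induction vis with
  | nil =>
    intro acc hacc
    simp only [List.map_nil, List.foldl_nil, pvACore, pvPartialLoop]
    simp
    omega
  | cons v t ih =>
    intro acc hacc
    have h5 := pvItemScore_ge c v
    simp only [List.map_cons, List.foldl_cons]
    rw [ih (max acc (pvItemScore c v)) (by simp only [max_def]; split_ifs <;> omega), pvACore_cons]
    have hb := pvACore_bounds c t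
    simp only [max_def]
    split_ifs <;> omega

theorem pvMaxD_eq_ACore (c : String) (l : List String) :
    PySem.List.maxD (l.map (fun i => pvItemScore c (PySem.Str.lower i))) (fun x => x) 5
      = pvACore c (l.map PySem.Str.lower) := by
  cases l with
  | nil => simp [PySem.List.maxD, PySem.List.max?, pvACore, pvPartialLoop]
  | cons v t =>
    have h5 := pvItemScore_ge c (PySem.Str.lower v)
    simp only [List.map_cons, PySem.List.maxD]
    rw [pvMaxFoldSome]
    simp only [Option.getD_some]
    have hf := pvFoldMax c (t.map PySem.Str.lower) (pvItemScore c (PySem.Str.lower v)) h5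
    simp only [List.map_map, Function.comp_def] at hf
    rw [hf, pvACore_cons]

-- ===== VERDICT (by name: the statement is the Claim_ definition above) =====
theorem score_industry_fit_py_spec : Claim_equal_score_industry_fit_py := by
  intro vendor industry _
  unfold Spec_score_industry_fit_py score_industry_fit_py score_industry_fit_py_alt
  by_cases hg : PySem.Str.lower industry = "" ∨ PySem.Str.lower industry = "unknown"
  · rw [if_pos hg, if_pos hg]
  · rw [if_neg hg, if_neg hg]
    rw [pvMaxD_eq_ACore]
    rfl
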